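-- pv_equiv track=rewrite | github.com/Bennyhwanggggg/Algorithm-and-Data-Structures-and-Coding-Challenges | Challenges/longestLine.py | findMaxInCol
-- ===== SOURCE A (Python) =====
-- def findMaxInCol(M, col):
--     count, longest = 0, 0
--     for i in range(len(M)):
--         if M[i][col] == 1:
--             count += 1
--             longest = max(longest, count)
--         else:
--             count = 0
--     return longest
-- ===== SOURCE B (Python) =====
-- def findMaxInCol(M, col):
--     vals = [row[col] for row in M]
--     n = len(vals)
--     best = 0
--     i = 0
--     while i < n:
--         if vals[i] == 1:
--             j = i + 1
--             while j < n and vals[j] == 1: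
--                 j += 1
--             if j - i > best:
--                 best = j - i
--             i = j
--         else:
--             i += 1
--     return best
-- ===== Notes on version B (the rewrite author's own statement) =====
-- stated objective: alternative
-- what changed: B extracts the column once, then scans it with two pointers over maximal runs of 1s (an inner scan per run), instead of A's per-row counter with reset and running max.
import Mathlib
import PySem

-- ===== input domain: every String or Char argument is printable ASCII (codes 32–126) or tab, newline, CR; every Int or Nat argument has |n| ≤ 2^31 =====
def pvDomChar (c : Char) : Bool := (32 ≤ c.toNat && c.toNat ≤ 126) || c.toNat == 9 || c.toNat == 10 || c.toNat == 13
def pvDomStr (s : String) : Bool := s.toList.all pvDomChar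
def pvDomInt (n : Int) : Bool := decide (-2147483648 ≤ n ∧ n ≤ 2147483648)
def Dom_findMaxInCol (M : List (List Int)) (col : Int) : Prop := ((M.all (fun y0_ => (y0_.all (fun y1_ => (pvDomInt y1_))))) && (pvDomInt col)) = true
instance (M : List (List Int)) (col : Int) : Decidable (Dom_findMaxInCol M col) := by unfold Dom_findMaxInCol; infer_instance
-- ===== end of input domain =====

-- B scans the extracted column by maximal runs of 1s (two pointers) instead of A's per-row counter with reset; return values only, no mutation in either program.

-- ===== PORT A =====
-- A: running counter reset on non-1, running maximum.  M[i][col] via pyGet?;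
-- under Pre_ the lookup always succeeds, so getD 0 is never exercised.
def findMaxInCol (M : List (List Int)) (col : Int) : Int :=
  (M.foldl (fun (p : Int × Int) row =>
      if (PySem.List.pyGet? row col).getD 0 = 1 then
        (p.1 + 1, max p.2 (p.1 + 1))
      else (0, p.2)) (0, 0)).2

-- ===== PORT B =====
-- vals = [row[col] for row in M]
def colVals (M : List (List Int)) (col : Int) : List Int :=
  M.map (fun row => (PySem.List.pyGet? row col).getD 0)

-- inner while loop: count the leading 1s and return the remainder
def takeOnes : List Int → Nat × List Int
  | [] => (0, [])
  | x :: rest =>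
    if x = 1 then
      let p := takeOnes rest
      (p.1 + 1, p.2)
    else (0, x :: rest)

theorem takeOnes_len_le : ∀ (vs : List Int), (takeOnes vs).2.length ≤ vs.length := by
  intro vs
  induction vs with
  | nil => simp [takeOnes]
  | cons x rest ih =>
    simp only [takeOnes]
    split
    · exact Nat.le_succ_of_le ih
    · simp

-- outer while loop: advance past non-1s; at a 1, measure the whole run and recurse after it
def longestRun : List Int → Int
  | [] => 0
  | x :: rest =>
    if x = 1 then
      let p := takeOnes rest
      max ((p.1 : Int) + 1) (longestRun p.2)
    else longestRun rest
termination_by vs => vs.length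
decreasing_by
  · exact Nat.lt_succ_of_le (takeOnes_len_le rest)
  · simp

def findMaxInCol_alt (M : List (List Int)) (col : Int) : Int :=
  longestRun (colVals M col)

-- ===== PRECONDITION & SPEC =====
-- Pre_ excludes exactly the inputs where Python A raises IndexError: some row for which
-- col is not a valid (possibly negative) index.
def Pre_findMaxInCol (M : List (List Int)) (col : Int) : Prop :=
  ∀ row ∈ M, -(row.length : Int) ≤ col ∧ col < (row.length : Int)
instance (M : List (List Int)) (col : Int) : Decidable (Pre_findMaxInCol M col) := by
  unfold Pre_findMaxInCol; infer_instance

def pvWitness_findMaxInCol : List (List Int) × Int := ([[1, 0], [1, 1], [0, 1]], 1)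

def Spec_findMaxInCol (M : List (List Int)) (col : Int) (out : Int) : Prop := out = findMaxInCol_alt M col
instance (M : List (List Int)) (col : Int) (out : Int) : Decidable (Spec_findMaxInCol M col out) := by unfold Spec_findMaxInCol; infer_instance

-- ===== CLAIM (what is proved, stated in full; the proofs are below) =====
def Claim_equal_findMaxInCol : Prop := ∀ (M : List (List Int)) (col : Int), Dom_findMaxInCol M col → Pre_findMaxInCol M col → Spec_findMaxInCol M col (findMaxInCol M col)

-- ===== LEMMAS AND PROOFS =====

-- A's loop restated on the extracted column values
def loopA : List Int → Int → Int → Int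
  | [], _, b => b
  | x :: xs, c, b => if x = 1 then loopA xs (c + 1) (max b (c + 1)) else loopA xs 0 b

theorem findMaxInCol_eq_loopA (M : List (List Int)) (col : Int) :
    findMaxInCol M col = loopA (colVals M col) 0 0 := by
  have h : ∀ (vs : List Int) (c b : Int),
      (vs.foldl (fun (p : Int × Int) v =>
        if v = 1 then (p.1 + 1, max p.2 (p.1 + 1)) else (0, p.2)) (c, b)).2 = loopA vs c b := by
    intro vs
    induction vs with
    | nil => intro c b; rfl
    | cons x xs ih =>
      intro c b
      simp only [List.foldl, loopA]
      split <;> exact ih _ _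
  unfold findMaxInCol colVals
  rw [← h, List.foldl_map]

-- best vs c: the longest run of 1s in vs, where a leading run is extended by c
def best : List Int → Int → Int
  | [], _ => 0
  | x :: xs, c => if x = 1 then max (c + 1) (best xs (c + 1)) else best xs 0

theorem best_nonneg : ∀ (vs : List Int) (c : Int), 0 ≤ c → 0 ≤ best vs c := by
  intro vs
  induction vs with
  | nil => intro c _; simp [best]
  | cons x xs ih =>
    intro c hc
    simp only [best]
    split
    · have := ih (c + 1) (by omega)
      omega
    · exact ih 0 le_rfl

theorem loopA_eq_best : ∀ (vs : List Int) (c b : Int), 0 ≤ c → c ≤ b →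
    loopA vs c b = max b (best vs c) := by
  intro vs
  induction vs with
  | nil =>
    intro c b hc hb
    simp only [loopA, best]
    omega
  | cons x xs ih =>
    intro c b hc hb
    simp only [loopA, best]
    split
    · rw [ih (c + 1) (max b (c + 1)) (by omega) (by omega)]
      omega
    · rw [ih 0 b le_rfl (by omega)]

theorem best_takeOnes : ∀ (xs : List Int) (c : Int), 0 ≤ c →
    best (1 :: xs) c = max (c + 1 + ((takeOnes xs).1 : Int)) (best (takeOnes xs).2 0) := by
  intro xs
  induction xs with
  | nil =>
    intro c hc
    simp only [best, takeOnes]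
    push_cast
    omega
  | cons y ys ih =>
    intro c hc
    by_cases hy : y = 1
    · subst hy
      have h1 : best (1 :: 1 :: ys) c = max (c + 1) (best (1 :: ys) (c + 1)) := by
        simp [best]
      rw [h1, ih (c + 1) (by omega)]
      have h2 : takeOnes (1 :: ys) = ((takeOnes ys).1 + 1, (takeOnes ys).2) := by
        simp [takeOnes]
      rw [h2]
      push_cast
      omega
    · have h1 : best (1 :: y :: ys) c = max (c + 1) (best ys 0) := by
        simp [best, hy]
      have h2 : takeOnes (y :: ys) = (0, y :: ys) := by simp [takeOnes, hy]
      rw [h1, h2]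
      have h3 : best (y :: ys) 0 = best ys 0 := by simp [best, hy]
      rw [h3]
      push_cast
      omega

theorem longestRun_eq_best_aux : ∀ (n : Nat) (vs : List Int), vs.length ≤ n → longestRun vs = best vs 0 := by
  intro n
  induction n with
  | zero =>
    intro vs h
    have : vs = [] := List.eq_nil_of_length_eq_zero (Nat.le_zero.mp h)
    subst this
    simp [longestRun, best]
  | succ n ih =>
    intro vs h
    match vs with
    | [] => simp [longestRun, best]
    | x :: rest =>
      have hr : rest.length ≤ n := Nat.le_of_succ_le_succ (by simpa using h)
      rw [longestRun]
      by_cases hx : x = 1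
      · subst hx
        simp only [if_pos rfl, Int.reduceEq]
        rw [best_takeOnes rest 0 le_rfl,
            ih (takeOnes rest).2 (le_trans (takeOnes_len_le rest) hr)]
        push_cast
        omega
      · rw [if_neg hx]
        have hb : best (x :: rest) 0 = best rest 0 := by simp [best, hx]
        rw [hb, ih rest hr]

theorem longestRun_eq_best (vs : List Int) : longestRun vs = best vs 0 :=
  longestRun_eq_best_aux vs.length vs le_rfl

-- ===== VERDICT (by name: the statement is the Claim_ definition above) =====
theorem findMaxInCol_spec : Claim_equal_findMaxInCol := by
  intro M col _ _
  unfold Spec_findMaxInCol findMaxInCol_alt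
  rw [findMaxInCol_eq_loopA, loopA_eq_best _ 0 0 le_rfl le_rfl, longestRun_eq_best]
  have := best_nonneg (colVals M col) 0 le_rfl
  omega
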